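-- pv_equiv track=rewrite | github.com/realZillionX/InspireSkill | cli/inspire/config/schema_models.py | _parse_list
-- ===== SOURCE A (Python) =====
-- def _parse_list(value: str) -> list[str]:
--     """Parse comma or newline separated list."""
--     if not value:
--         return []
--     parts = []
--     for raw in value.replace("\r", "").split("\n"):
--         for chunk in raw.split(","):
--             item = chunk.strip()
--             if item:
--                 parts.append(item)
--     return parts
-- ===== SOURCE B (Python) =====
-- def _parse_list(value: str) -> list[str]:
--     """Parse comma or newline separated list (single character scan, no split)."""
--     parts = []
--     buf = []
--     for ch in value:
--         if ch in ",\n":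
--             token = "".join(buf).strip()
--             if token:
--                 parts.append(token)
--             buf = []
--         elif ch != "\r":
--             buf.append(ch)
--     token = "".join(buf).strip()
--     if token:
--         parts.append(token)
--     return parts
-- ===== Notes on version B (the rewrite author's own statement) =====
-- stated objective: alternative
-- what changed: B replaces A's replace-then-nested-split pipeline with a single left-to-right character scan keeping an explicit token buffer: each char is classified (separator / carriage return / ordinary) and tokens are flushed (strip + drop-if-empty) at separators and at end of input.
import Mathlib
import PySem

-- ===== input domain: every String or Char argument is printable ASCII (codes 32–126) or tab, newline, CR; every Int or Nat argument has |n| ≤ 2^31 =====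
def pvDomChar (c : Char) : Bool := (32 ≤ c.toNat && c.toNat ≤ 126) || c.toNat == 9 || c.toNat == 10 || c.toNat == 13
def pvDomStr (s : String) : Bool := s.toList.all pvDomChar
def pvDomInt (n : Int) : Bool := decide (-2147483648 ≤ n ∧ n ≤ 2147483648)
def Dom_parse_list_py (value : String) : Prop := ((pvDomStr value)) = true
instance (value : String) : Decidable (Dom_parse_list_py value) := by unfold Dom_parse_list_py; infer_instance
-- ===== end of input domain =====

-- B replaces A's replace/nested-split pipeline by a single character scan with an explicit
-- token buffer flushed at separators and at end of input (objective: alternative, same cost).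

-- ===== PORT A =====
-- s.split(sep) with the non-empty literal separators "\n" and "," is PySem.Chars.splitOn (exact).
def parse_list_py (value : String) : List String :=
  if value = "" then []
  else
    (PySem.Chars.splitOn (PySem.Chars.replace value.toList ['\r'] []) ['\n']).foldl
      (fun parts raw =>
        (PySem.Chars.splitOn raw [',']).foldl
          (fun parts chunk =>
            let item := PySem.Chars.strip chunk
            if item ≠ [] then parts ++ [String.ofList item] else parts)
          parts)
      []

-- ===== PORT B =====
-- ch in ",\n" → (ch = ',' ∨ ch = '\n'); "".join(buf).strip() → PySem.Chars.strip buf.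
def parse_list_py_alt (value : String) : List String :=
  let st := value.toList.foldl
    (fun (st : List String × List Char) ch =>
      if ch = ',' ∨ ch = '\n' then
        let token := PySem.Chars.strip st.2
        ((if token ≠ [] then st.1 ++ [String.ofList token] else st.1), [])
      else if ch = '\r' then st
      else (st.1, st.2 ++ [ch]))
    ([], [])
  let token := PySem.Chars.strip st.2
  if token ≠ [] then st.1 ++ [String.ofList token] else st.1

-- ===== PRECONDITION & SPEC =====
def Spec_parse_list_py (value : String) (out : List String) : Prop := out = parse_list_py_alt value
instance (value : String) (out : List String) : Decidable (Spec_parse_list_py value out) := by unfold Spec_parse_list_py; infer_instance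

-- ===== CLAIM (what is proved, stated in full; the proofs are below) =====
def Claim_equal_parse_list_py : Prop := ∀ (value : String), Dom_parse_list_py value → Spec_parse_list_py value (parse_list_py value)

-- ===== LEMMAS AND PROOFS =====

-- Split at a single character, the simple structural recursion A's splitOn calls reduce to.
def splitCh (c : Char) : List Char → List (List Char)
  | [] => [[]]
  | x :: t => if x = c then [] :: splitCh c t else List.modifyHead (x :: ·) (splitCh c t)

-- Split at ',' or '\n' simultaneously.
def split2 : List Char → List (List Char)
  | [] => [[]]
  | x :: t => if x = ',' ∨ x = '\n' then [] :: split2 t else List.modifyHead (x :: ·) (split2 t)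

-- Split at ',' or '\n' while skipping '\r' — the piece decomposition B's scan computes.
def scanSplit : List Char → List (List Char)
  | [] => [[]]
  | x :: t =>
    if x = ',' ∨ x = '\n' then [] :: scanSplit t
    else if x = '\r' then scanSplit t
    else List.modifyHead (x :: ·) (scanSplit t)

-- The shared strip/drop-empties post-processing of a piece list.
def pickTokens (pieces : List (List Char)) : List String :=
  (pieces.filter (fun chunk => !(PySem.Chars.strip chunk).isEmpty)).map
    (fun chunk => String.ofList (PySem.Chars.strip chunk))

theorem splitCh_ne_nil (c : Char) (l : List Char) : splitCh c l ≠ [] := by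
  induction l with
  | nil => simp [splitCh]
  | cons x t ih =>
    simp only [splitCh]; split
    · simp
    · cases h : splitCh c t with
      | nil => exact absurd h ih
      | cons a l => simp [List.modifyHead]

theorem split2_ne_nil (l : List Char) : split2 l ≠ [] := by
  induction l with
  | nil => simp [split2]
  | cons x t ih =>
    simp only [split2]; split
    · simp
    · cases h : split2 t with
      | nil => exact absurd h ih
      | cons a l => simp [List.modifyHead]

theorem splitOn_go_eq (c : Char) (fuel : Nat) (l cur : List Char) (acc : List (List Char))
    (h : l.length ≤ fuel) :
    PySem.Chars.splitOn.go [c] fuel l cur acc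
      = acc.reverse ++ List.modifyHead (cur.reverse ++ ·) (splitCh c l) := by
  induction fuel generalizing l cur acc with
  | zero =>
    have : l = [] := by cases l <;> simp_all
    subst this
    simp [PySem.Chars.splitOn.go, splitCh]
  | succ n ih =>
    match l with
    | [] => simp [PySem.Chars.splitOn.go, splitCh]
    | x :: rest =>
      simp only [PySem.Chars.splitOn.go]
      have hp : [c].isPrefixOf (x :: rest) = (x == c) := by
        simp [List.isPrefixOf, eq_comm]
      rw [hp]
      by_cases hx : x = c
      · subst hx
        simp only [beq_self_eq_true, if_true, List.length_nil, Nat.zero_add, List.drop_succ_cons, List.drop_zero, List.length_cons] at *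
        rw [ih rest [] (cur.reverse :: acc) (by omega)]
        cases hs : splitCh x rest with
        | nil => exact absurd hs (splitCh_ne_nil x rest)
        | cons a l => simp [splitCh, hs, List.modifyHead]
      · simp only [beq_iff_eq, hx, if_false]
        rw [ih rest (x :: cur) acc (by simp at h; omega)]
        cases hs : splitCh c rest with
        | nil => exact absurd hs (splitCh_ne_nil c rest)
        | cons a l => simp [splitCh, hx, hs, List.modifyHead]

theorem splitOn_single (c : Char) (s : List Char) :
    PySem.Chars.splitOn s [c] = splitCh c s := by
  rw [PySem.Chars.splitOn, splitOn_go_eq c _ s [] [] (by omega)]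
  cases hs : splitCh c s with
  | nil => exact absurd hs (splitCh_ne_nil c s)
  | cons a l => simp [List.modifyHead]

theorem replace_go_eq (o : Char) (new : List Char) (fuel : Nat) (l acc : List Char)
    (h : l.length ≤ fuel) :
    PySem.Chars.replace.go [o] new fuel l acc
      = acc.reverse ++ l.flatMap (fun x => if x = o then new else [x]) := by
  induction fuel generalizing l acc with
  | zero =>
    have : l = [] := by cases l <;> simp_all
    subst this; simp [PySem.Chars.replace.go]
  | succ n ih =>
    match l with
    | [] => simp [PySem.Chars.replace.go]
    | x :: rest =>
      simp only [PySem.Chars.replace.go]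
      have hp : [o].isPrefixOf (x :: rest) = (x == o) := by simp [List.isPrefixOf, eq_comm]
      rw [hp]
      simp only [List.length_cons] at h
      by_cases hx : x = o
      · subst hx
        simp only [beq_self_eq_true, if_true, List.length_cons, List.drop_succ_cons]
        show PySem.Chars.replace.go [x] new n rest (new.reverse ++ acc) = _
        rw [ih rest (new.reverse ++ acc) (by omega)]
        simp
      · simp only [beq_iff_eq, hx, if_false]
        rw [ih rest (x :: acc) (by omega)]
        simp [hx]

theorem replace_single (o : Char) (new s : List Char) :
    PySem.Chars.replace s [o] new = s.flatMap (fun x => if x = o then new else [x]) := by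
  rw [PySem.Chars.replace]
  simp only [List.isEmpty_cons]
  rw [replace_go_eq o new s.length s [] le_rfl]
  simp

-- Splitting at '\n' and then each line at ',' = splitting at both separators at once.
theorem split_nl_comma (s : List Char) :
    (splitCh '\n' s).flatMap (splitCh ',') = split2 s := by
  induction s with
  | nil => simp [splitCh, split2]
  | cons x t ih =>
    by_cases hn : x = '\n'
    · subst hn
      simp only [splitCh, if_pos rfl, List.flatMap_cons, split2]
      simpa [splitCh] using ih
    · cases hs : splitCh '\n' t with
      | nil => exact absurd hs (splitCh_ne_nil '\n' t)
      | cons p ps =>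
        rw [hs] at ih
        by_cases hc : x = ','
        · subst hc
          simp only [splitCh, if_neg hn, hs, List.modifyHead, List.flatMap_cons, if_pos rfl,
            split2, true_or, if_true]
          simpa using ih
        · simp only [splitCh, if_neg hn, hs, List.modifyHead, List.flatMap_cons, if_neg hc,
            split2, hc, hn, or_self, if_false]
          rw [← ih]
          cases hp : splitCh ',' p with
          | nil => exact absurd hp (splitCh_ne_nil ',' p)
          | cons q qs => simp [hp, List.modifyHead]

-- B's '\r' skip during the scan = A's global '\r' deletion before splitting.
theorem scanSplit_eq (l : List Char) :
    scanSplit l = split2 (l.flatMap (fun x => if x = '\r' then [] else [x])) := by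
  induction l with
  | nil => simp [scanSplit, split2]
  | cons x t ih =>
    by_cases hsep : x = ',' ∨ x = '\n'
    · have hr : x ≠ '\r' := by rcases hsep with h | h <;> simp [h]
      simp only [scanSplit, if_pos hsep, List.flatMap_cons, if_neg hr, List.singleton_append,
        split2, if_pos hsep, ih]
    · by_cases hr : x = '\r'
      · simp [scanSplit, hsep, hr, ih]
      · simp [scanSplit, hsep, hr, split2, ih]

theorem pickTokens_cons (p : List Char) (ps : List (List Char)) :
    pickTokens (p :: ps)
      = (if PySem.Chars.strip p ≠ [] then [String.ofList (PySem.Chars.strip p)] else [])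
          ++ pickTokens ps := by
  by_cases hp : PySem.Chars.strip p = [] <;> simp [pickTokens, List.filter_cons, hp]

-- The invariant of B's scan: flushing the final state of the fold started at (parts, buf)
-- yields parts followed by the tokens of the pieces of l with buf prepended to the first.
theorem bscan_eq (l : List Char) (parts : List String) (buf : List Char) :
    (let st := l.foldl
        (fun (st : List String × List Char) ch =>
          if ch = ',' ∨ ch = '\n' then
            let token := PySem.Chars.strip st.2
            ((if token ≠ [] then st.1 ++ [String.ofList token] else st.1), [])
          else if ch = '\r' then st
          else (st.1, st.2 ++ [ch]))
        (parts, buf);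
      let token := PySem.Chars.strip st.2
      if token ≠ [] then st.1 ++ [String.ofList token] else st.1)
      = parts ++ pickTokens (List.modifyHead (buf ++ ·) (scanSplit l)) := by
  induction l generalizing parts buf with
  | nil =>
    simp only [List.foldl_nil, scanSplit, List.modifyHead, List.append_nil]
    rw [pickTokens_cons]
    by_cases hb : PySem.Chars.strip buf = [] <;> simp [pickTokens, hb]
  | cons x t ih =>
    by_cases hsep : x = ',' ∨ x = '\n'
    · simp only [List.foldl_cons, if_pos hsep]
      rw [ih]
      simp only [scanSplit, if_pos hsep, List.modifyHead, List.append_nil]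
      rw [pickTokens_cons]
      cases hs : scanSplit t with
      | nil => simp [hs]; by_cases hb : PySem.Chars.strip buf = [] <;> simp [hb, pickTokens]
      | cons p ps =>
        by_cases hb : PySem.Chars.strip buf = [] <;>
          simp [hb, List.modifyHead, List.append_assoc]
    · by_cases hr : x = '\r'
      · simp only [List.foldl_cons, if_neg hsep, if_pos hr]
        rw [ih]
        simp [scanSplit, hsep, hr]
      · simp only [List.foldl_cons, if_neg hsep, if_neg hr]
        rw [ih]
        simp only [scanSplit, if_neg hsep, if_neg hr]
        cases hs : scanSplit t with
        | nil => exact absurd (by simpa [scanSplit_eq t] using hs) (split2_ne_nil _)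
        | cons p ps => simp [List.modifyHead, List.append_assoc]

-- A's inner comma loop as filter-then-map (via PySem.List.foldl_append_if).
theorem inner_loop_eq (parts : List String) (raw : List Char) :
    (PySem.Chars.splitOn raw [',']).foldl
        (fun parts chunk =>
          let item := PySem.Chars.strip chunk
          if item ≠ [] then parts ++ [String.ofList item] else parts)
        parts
      = parts ++ pickTokens (splitCh ',' raw) := by
  rw [splitOn_single]
  have hbody : (fun (parts : List String) (chunk : List Char) =>
        let item := PySem.Chars.strip chunk
        if item ≠ [] then parts ++ [String.ofList item] else parts)
      = (fun acc x => if (fun chunk => !(PySem.Chars.strip chunk).isEmpty) x = true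
          then acc ++ [(fun chunk => String.ofList (PySem.Chars.strip chunk)) x] else acc) := by
    funext acc x
    by_cases hx : PySem.Chars.strip x = [] <;> simp [hx]
  rw [hbody, PySem.List.foldl_append_if]
  rfl

theorem pickTokens_flatMap (l : List (List Char)) (f : List Char → List (List Char)) :
    pickTokens (l.flatMap f) = l.flatMap (fun x => pickTokens (f x)) := by
  induction l with
  | nil => rfl
  | cons x t ih => simp [pickTokens, List.flatMap_cons, List.filter_append] at *; simp [ih]

-- ===== VERDICT (by name: the statement is the Claim_ definition above) =====
theorem parse_list_py_spec : Claim_equal_parse_list_py := by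
  intro value _
  unfold Spec_parse_list_py
  by_cases hv : value = ""
  · subst hv; decide
  · unfold parse_list_py parse_list_py_alt
    simp only [if_neg hv]
    rw [bscan_eq]
    set r := PySem.Chars.replace value.toList ['\r'] [] with hr
    have houter : (PySem.Chars.splitOn r ['\n']).foldl
        (fun parts raw =>
          (PySem.Chars.splitOn raw [',']).foldl
            (fun parts chunk =>
              let item := PySem.Chars.strip chunk
              if item ≠ [] then parts ++ [String.ofList item] else parts)
            parts)
        []
      = (splitCh '\n' r).flatMap (fun raw => pickTokens (splitCh ',' raw)) := by
      rw [splitOn_single]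
      have : (fun (parts : List String) (raw : List Char) =>
          (PySem.Chars.splitOn raw [',']).foldl
            (fun parts chunk =>
              let item := PySem.Chars.strip chunk
              if item ≠ [] then parts ++ [String.ofList item] else parts)
            parts)
        = (fun acc raw => acc ++ (fun raw => pickTokens (splitCh ',' raw)) raw) := by
        funext parts raw
        exact inner_loop_eq parts raw
      rw [this, PySem.List.foldl_append_eq_flatMap]
      simp
    rw [houter, ← pickTokens_flatMap, split_nl_comma, scanSplit_eq]
    rw [replace_single '\r' [] value.toList] at hr
    rw [hr]
    cases hs : split2 (value.toList.flatMap fun x => if x = '\r' then [] else [x]) with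
    | nil => exact absurd hs (split2_ne_nil _)
    | cons p ps => simp [List.modifyHead]
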